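-- pv_equiv track=rewrite | github.com/JustADataConstruct/CodeWars-Python | 6kyu/typist.py | typist
-- ===== SOURCE A (Python) =====
-- def typist(s: str) -> int:
--     result = 0
--     for i in range(0, len(s)):
--         if i == 0:
--             if s[i].isupper():
--                 result += 2
--             else:
--                 result += 1
--         else:
--             if (s[i].islower() and s[i-1].isupper()) or (s[i].isupper() and s[i-1].islower()):
--                 result += 2
--             else:
--                 result += 1
--     return result
-- ===== SOURCE B (Python) =====
-- def typist(s: str) -> int:
--     # index-set formulation: keystrokes = len(s) + number of shift presses,
--     # where a shift is pressed at every uppercase index preceded by a lowercase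
--     # index, every lowercase index preceded by an uppercase index, and at index 0
--     # if it is uppercase.
--     up = {i for i, c in enumerate(s) if c.isupper()}
--     low = {i for i, c in enumerate(s) if c.islower()}
--     shifts = len(up & {i + 1 for i in low}) + len(low & {i + 1 for i in up}) + (0 in up)
--     return len(s) + shifts
-- ===== Notes on version B (the rewrite author's own statement) =====
-- stated objective: alternative
-- what changed: Replaces A's single indexed scan with i==0 special-casing by a staged set formulation: build the sets of uppercase and lowercase indices, then compute shifts as |up & (low+1)| + |low & (up+1)| + (0 in up) and return len(s) plus that.
import Mathlib
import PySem

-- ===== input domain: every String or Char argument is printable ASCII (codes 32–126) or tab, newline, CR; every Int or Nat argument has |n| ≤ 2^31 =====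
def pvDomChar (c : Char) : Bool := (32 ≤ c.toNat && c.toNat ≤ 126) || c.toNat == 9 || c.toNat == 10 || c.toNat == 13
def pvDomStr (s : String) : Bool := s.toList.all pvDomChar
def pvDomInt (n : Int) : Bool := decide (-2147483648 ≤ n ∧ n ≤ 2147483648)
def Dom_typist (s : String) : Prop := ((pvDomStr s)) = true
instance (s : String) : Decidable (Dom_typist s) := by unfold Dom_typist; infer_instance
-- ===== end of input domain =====

-- B recasts the scan over consecutive characters as set arithmetic on index sets:
-- keystrokes = len(s) + |up ∩ (low+1)| + |low ∩ (up+1)| + [0 ∈ up]; same cost, a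
-- different (staged, set-based) decomposition.

-- ===== PORT A =====
-- loop over i in range(0, len(s)); indices are always in range, so s[i] is ported as getD with
-- an arbitrary default that is never used
def typist (s : String) : Int :=
  (List.range s.toList.length).foldl (fun result i =>
    if i = 0 then
      if PySem.Chars.isupper (s.toList.getD i ' ') then result + 2 else result + 1
    else
      if (PySem.Chars.islower (s.toList.getD i ' ') && PySem.Chars.isupper (s.toList.getD (i-1) ' ')) ||
         (PySem.Chars.isupper (s.toList.getD i ' ') && PySem.Chars.islower (s.toList.getD (i-1) ' ')) then
        result + 2
      else result + 1) 0

-- ===== PORT B =====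
def typist_alt (s : String) : Int :=
  let up : PySem.Set Int :=
    PySem.Set.ofList (((PySem.List.enumerate s.toList 0).filter
      (fun p => PySem.Chars.isupper p.2)).map (·.1))
  let low : PySem.Set Int :=
    PySem.Set.ofList (((PySem.List.enumerate s.toList 0).filter
      (fun p => PySem.Chars.islower p.2)).map (·.1))
  let shifts : Int :=
    PySem.Set.len (PySem.Set.inter up (PySem.Set.ofList (low.map (· + 1))))
    + PySem.Set.len (PySem.Set.inter low (PySem.Set.ofList (up.map (· + 1))))
    + (if PySem.Set.contains up 0 then 1 else 0)
  (s.toList.length : Int) + shifts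

-- ===== PRECONDITION & SPEC =====
def Spec_typist (s : String) (out : Int) : Prop := out = typist_alt s
instance (s : String) (out : Int) : Decidable (Spec_typist s out) := by unfold Spec_typist; infer_instance

-- ===== CLAIM (what is proved, stated in full; the proofs are below) =====
def Claim_equal_typist : Prop := ∀ (s : String), Dom_typist s → Spec_typist s (typist s)

-- ===== LEMMAS AND PROOFS =====

-- index list of the characters satisfying p (what each set comprehension in B builds, in order)
def pvIdx (l : List Char) (p : Char → Bool) : List Int :=
  ((PySem.List.enumerate l 0).filter (fun q => p q.2)).map (·.1)

-- A's per-index condition ("this keypress needs a shift")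
def pvG (l : List Char) (k : Nat) : Bool :=
  if k = 0 then PySem.Chars.isupper (l.getD 0 ' ')
  else (PySem.Chars.islower (l.getD k ' ') && PySem.Chars.isupper (l.getD (k-1) ' ')) ||
       (PySem.Chars.isupper (l.getD k ' ') && PySem.Chars.islower (l.getD (k-1) ' '))

-- B's three per-index conditions
def pvR1 (l : List Char) (k : Nat) : Bool :=
  decide (1 ≤ k) && (PySem.Chars.islower (l.getD (k-1) ' ') && PySem.Chars.isupper (l.getD k ' '))
def pvR2 (l : List Char) (k : Nat) : Bool :=
  decide (1 ≤ k) && (PySem.Chars.isupper (l.getD (k-1) ' ') && PySem.Chars.islower (l.getD k ' '))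
def pvR0 (l : List Char) (k : Nat) : Bool :=
  decide (k = 0) && PySem.Chars.isupper (l.getD 0 ' ')

lemma pv_not_upper_lower (c : Char) :
    PySem.Chars.isupper c = true → PySem.Chars.islower c = false := by
  simp only [PySem.Chars.isupper, PySem.Chars.islower, Bool.and_eq_true, decide_eq_true_eq,
    Bool.and_eq_false_iff, decide_eq_false_iff_not]
  intro h
  left
  intro hc
  exact absurd (le_trans hc h.2) (by decide)

lemma pv_foldl_two_one (p : Nat → Bool) (xs : List Nat) (a : Int) :
    xs.foldl (fun r i => if p i then r + 2 else r + 1) a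
      = a + xs.length + xs.countP p := by
  induction xs generalizing a with
  | nil => simp
  | cons x xs ih =>
    simp only [List.foldl_cons, ih, List.countP_cons, List.length_cons]
    split_ifs <;> push_cast <;> ring

lemma pv_typist_eq (s : String) :
    typist s = (s.toList.length : Int)
      + ((List.range s.toList.length).countP (pvG s.toList) : Int) := by
  unfold typist
  have hbody : (fun (result : Int) (i : Nat) =>
      if i = 0 then
        if PySem.Chars.isupper (s.toList.getD i ' ') then result + 2 else result + 1
      else
        if (PySem.Chars.islower (s.toList.getD i ' ') && PySem.Chars.isupper (s.toList.getD (i-1) ' ')) ||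
           (PySem.Chars.isupper (s.toList.getD i ' ') && PySem.Chars.islower (s.toList.getD (i-1) ' ')) then
          result + 2
        else result + 1)
      = (fun (r : Int) (i : Nat) => if pvG s.toList i then r + 2 else r + 1) := by
    funext r i
    by_cases hi : i = 0 <;> simp [pvG, hi]
  rw [hbody, pv_foldl_two_one]
  simp

lemma pv_mem_idx (l : List Char) (p : Char → Bool) (i : Int) :
    i ∈ pvIdx l p ↔ ∃ m : Nat, m < l.length ∧ p (l.getD m ' ') = true ∧ i = (m : Int) := by
  unfold pvIdx
  simp only [List.mem_map, List.mem_filter, PySem.List.mem_enumerate_iff]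
  constructor
  · rintro ⟨q, ⟨⟨k, hk, rfl⟩, hp⟩, rfl⟩
    refine ⟨k, hk, ?_, by simp⟩
    rw [List.getD_eq_getElem l ' ' hk]
    exact hp
  · rintro ⟨m, hm, hp, rfl⟩
    rw [List.getD_eq_getElem l ' ' hm] at hp
    exact ⟨((m : Int), l[m]), ⟨⟨m, hm, by simp⟩, hp⟩, rfl⟩

lemma pv_nodup_idx (l : List Char) (p : Char → Bool) : (pvIdx l p).Nodup := by
  unfold pvIdx
  have h1 : (PySem.List.enumerate l 0).Pairwise (fun q r => q.1 < r.1) :=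
    PySem.List.pairwise_lt_enumerate l 0
  have h2 := h1.filter (fun q => p q.2)
  have h3 : List.Pairwise (fun a b : Int => a ≠ b)
      ((List.filter (fun q => p q.2) (PySem.List.enumerate l 0)).map (·.1)) :=
    List.pairwise_map.mpr (h2.imp (fun h => ne_of_lt h))
  exact h3

lemma pv_pyRange_nat (n : Nat) :
    PySem.List.pyRange 0 (n : Int) 1 = (List.range n).map (fun (k : Nat) => (k : Int)) := by
  rw [PySem.List.pyRange_of_pos 0 (n : Int) Int.zero_lt_one]
  rcases Nat.eq_zero_or_pos n with h | h
  · simp [h]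
  · have hlt : (0 : Int) < (n : Int) := by exact_mod_cast h
    rw [if_pos hlt]
    have harg : (((n : Int) - 0 + 1 - 1) / 1).toNat = n := by
      simp
    rw [harg]
    apply List.map_congr_left
    intro k _
    simp

lemma pv_countP_idx (l : List Char) (p : Char → Bool) (q : Int → Bool) :
    (pvIdx l p).countP q
      = (List.range l.length).countP (fun (k : Nat) => q (k : Int) && p (l.getD k ' ')) := by
  unfold pvIdx
  rw [List.countP_map, List.countP_filter]
  rw [PySem.List.enumerate_eq_map_pyRange l ' ', List.countP_map]
  have hlen : PySem.List.len l = (l.length : Int) := rfl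
  rw [hlen, pv_pyRange_nat, List.countP_map]
  apply List.countP_congr
  intro k hk
  rw [List.mem_range] at hk
  simp [Function.comp, PySem.List.pyGetD_natCast]

lemma pv_countP_or_disj {α : Type} (p q : α → Bool) (l : List α)
    (h : ∀ a ∈ l, p a = true → q a = false) :
    l.countP (fun a => p a || q a) = l.countP p + l.countP q := by
  induction l with
  | nil => simp
  | cons x xs ih =>
    have hx := h x (List.mem_cons_self)
    have ih' := ih (fun a ha => h a (List.mem_cons_of_mem _ ha))
    simp only [List.countP_cons, ih']
    cases hp : p x <;> cases hq : q x <;> simp_all <;> omega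

lemma pv_countP_r0 (l : List Char) :
    (List.range l.length).countP (pvR0 l)
      = if (0 < l.length ∧ PySem.Chars.isupper (l.getD 0 ' ') = true) then 1 else 0 := by
  cases l with
  | nil => simp
  | cons c t =>
    have : (c :: t).length = t.length + 1 := rfl
    rw [this, List.range_succ_eq_map, List.countP_cons, List.countP_map]
    have hz : ∀ k ∈ List.range t.length, (pvR0 (c :: t) ∘ Nat.succ) k = false := by
      intro k _; simp [pvR0, Function.comp]
    rw [List.countP_eq_zero.mpr (by intro a ha h; rw [hz a ha] at h; exact Bool.false_ne_true h)]
    by_cases hc : PySem.Chars.isupper ((c :: t).getD 0 ' ') = true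
    · simp [pvR0]
    · simp [pvR0]

-- membership in the shifted set {i+1 for i in pvIdx l p}
lemma pv_contains_shift (l : List Char) (p : Char → Bool) (k : Nat) (hk : k < l.length) :
    PySem.Set.contains (PySem.Set.ofList ((pvIdx l p).map (· + 1))) (k : Int)
      = (decide (1 ≤ k) && p (l.getD (k-1) ' ')) := by
  rcases hb : (decide (1 ≤ k) && p (l.getD (k-1) ' ')) with _ | _
  · rw [Bool.eq_false_iff]
    intro hc
    rw [PySem.Set.contains_iff, PySem.Set.mem_ofList, List.mem_map] at hc
    obtain ⟨i, hi, hik⟩ := hc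
    rw [pv_mem_idx] at hi
    obtain ⟨m, hm, hpm, rfl⟩ := hi
    have hkm : k = m + 1 := by omega
    subst hkm
    simp only [List.getD] at hpm
    simp [hpm] at hb
  · rw [Bool.and_eq_true, decide_eq_true_eq] at hb
    obtain ⟨h1, hp⟩ := hb
    rw [PySem.Set.contains_iff, PySem.Set.mem_ofList, List.mem_map]
    refine ⟨((k - 1 : Nat) : Int), ?_, by omega⟩
    rw [pv_mem_idx]
    exact ⟨k - 1, by omega, hp, rfl⟩

lemma pv_contains_zero (l : List Char) :
    PySem.Set.contains (pvIdx l PySem.Chars.isupper) (0 : Int)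
      = decide (0 < l.length ∧ PySem.Chars.isupper (l.getD 0 ' ') = true) := by
  rcases h : decide (0 < l.length ∧ PySem.Chars.isupper (l.getD 0 ' ') = true) with _ | _
  · rw [decide_eq_false_iff_not] at h
    rw [Bool.eq_false_iff]
    intro hc
    rw [PySem.Set.contains_iff, pv_mem_idx] at hc
    obtain ⟨m, hm, hp, hm0⟩ := hc
    have : m = 0 := by omega
    subst this
    exact h ⟨hm, hp⟩
  · rw [decide_eq_true_eq] at h
    rw [PySem.Set.contains_iff, pv_mem_idx]
    exact ⟨0, h.1, h.2, rfl⟩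

lemma pv_G_split (l : List Char) (k : Nat) :
    pvG l k = (pvR1 l k || pvR2 l k || pvR0 l k) := by
  by_cases hk : k = 0
  · subst hk; simp [pvG, pvR1, pvR2, pvR0]
  · have h1 : decide (1 ≤ k) = true := by simp; omega
    simp only [pvG, pvR1, pvR2, pvR0, if_neg hk, h1, Bool.true_and]
    rw [decide_eq_false hk]
    cases PySem.Chars.islower (l.getD k ' ') <;>
      cases PySem.Chars.isupper (l.getD (k-1) ' ') <;>
      cases PySem.Chars.isupper (l.getD k ' ') <;>
      cases PySem.Chars.islower (l.getD (k-1) ' ') <;> simp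

-- ===== VERDICT (by name: the statement is the Claim_ definition above) =====
theorem typist_spec : Claim_equal_typist := by
  intro s _
  unfold Spec_typist typist_alt
  set l := s.toList with hl
  -- the two comprehension lists are nodup, so set-of-list keeps them as they are
  rw [show (((PySem.List.enumerate l 0).filter (fun p => PySem.Chars.isupper p.2)).map (·.1))
        = pvIdx l PySem.Chars.isupper from rfl,
      show (((PySem.List.enumerate l 0).filter (fun p => PySem.Chars.islower p.2)).map (·.1))
        = pvIdx l PySem.Chars.islower from rfl]
  simp only [PySem.Set.ofList_eq_self_of_nodup _ (pv_nodup_idx l PySem.Chars.isupper),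
    PySem.Set.ofList_eq_self_of_nodup _ (pv_nodup_idx l PySem.Chars.islower)]
  -- intersections become countP over the index lists
  have hinter : ∀ (p : Char → Bool) (t : PySem.Set Int),
      PySem.Set.len (PySem.Set.inter (pvIdx l p) t)
        = ((pvIdx l p).countP (fun x => PySem.Set.contains t x) : Int) := by
    intro p t
    simp only [PySem.Set.len, PySem.Set.inter, ← List.countP_eq_length_filter]
  rw [hinter, hinter]
  -- rewrite the two intersection counts as range-counts of pvR1 / pvR2
  rw [pv_countP_idx l PySem.Chars.isupper, pv_countP_idx l PySem.Chars.islower]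
  have hc1 : (List.range l.length).countP
        (fun (k : Nat) => PySem.Set.contains (PySem.Set.ofList ((pvIdx l PySem.Chars.islower).map (· + 1)))
          (k : Int) && PySem.Chars.isupper (l.getD k ' '))
      = (List.range l.length).countP (pvR1 l) := by
    apply List.countP_congr
    intro k hk
    rw [List.mem_range] at hk
    rw [pv_contains_shift l PySem.Chars.islower k hk]
    simp only [pvR1, Bool.and_eq_true, decide_eq_true_eq]
    tauto
  have hc2 : (List.range l.length).countP
        (fun (k : Nat) => PySem.Set.contains (PySem.Set.ofList ((pvIdx l PySem.Chars.isupper).map (· + 1)))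
          (k : Int) && PySem.Chars.islower (l.getD k ' '))
      = (List.range l.length).countP (pvR2 l) := by
    apply List.countP_congr
    intro k hk
    rw [List.mem_range] at hk
    rw [pv_contains_shift l PySem.Chars.isupper k hk]
    simp only [pvR2, Bool.and_eq_true, decide_eq_true_eq]
    tauto
  rw [hc1, hc2, pv_contains_zero l]
  -- A's side: length plus a single range-count
  rw [pv_typist_eq s, ← hl]
  -- split A's count into the three disjoint counts
  have hsplit : (List.range l.length).countP (pvG l)
      = (List.range l.length).countP (pvR1 l) + (List.range l.length).countP (pvR2 l)
        + (List.range l.length).countP (pvR0 l) := by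
    calc (List.range l.length).countP (pvG l)
        = (List.range l.length).countP (fun k => (pvR1 l k || pvR2 l k) || pvR0 l k) := by
          apply List.countP_congr; intro k _; rw [pv_G_split]
      _ = (List.range l.length).countP (fun k => pvR1 l k || pvR2 l k)
          + (List.range l.length).countP (pvR0 l) := by
          apply pv_countP_or_disj
          intro k _ hk
          simp only [Bool.or_eq_true] at hk
          rcases hk with hk | hk <;>
            · simp only [pvR1, pvR2, Bool.and_eq_true, decide_eq_true_eq] at hk
              have hk0 : ¬ (k = 0) := by omega
              simp [pvR0, hk0]
      _ = (List.range l.length).countP (pvR1 l) + (List.range l.length).countP (pvR2 l)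
          + (List.range l.length).countP (pvR0 l) := by
          congr 1
          apply pv_countP_or_disj
          intro k _ hk
          simp only [pvR1, Bool.and_eq_true, decide_eq_true_eq] at hk
          simp only [pvR2, Bool.and_eq_false_iff]
          right
          right
          exact pv_not_upper_lower _ hk.2.2
  rw [hsplit, pv_countP_r0]
  by_cases h0 : (0 < l.length ∧ PySem.Chars.isupper (l.getD 0 ' ') = true)
  · simp
  · simp only [h0]
    simp
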